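-- pv_equiv track=rewrite | github.com/pypi-data/pypi-mirror-2 | packages/syzygy/syzygy-0.9.5.45-py2.5.egg/syzygy/SAMpileuphelper.py | return_acgtdi_list
-- ===== SOURCE A (Python) =====
-- def return_acgtdi_list(ref_idx,allele_list_threshold):
--     counts = [0,0,0,0,0,0,0,0,0,0,0,0]
--     for i in range(0,len(allele_list_threshold)):
--         if allele_list_threshold[i] == '.':
--             counts[ref_idx + 6] += 1
--         elif allele_list_threshold[i] == ',':
--             counts[ref_idx] += 1
--         elif allele_list_threshold[i] == 'a':
--             counts[6] += 1
--         elif allele_list_threshold[i] == 'c':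
--             counts[7] += 1
--         elif allele_list_threshold[i] == 'g':
--             counts[8] += 1
--         elif allele_list_threshold[i] == 't':
--             counts[9] += 1
--         elif allele_list_threshold[i] == 'A':
--             counts[0] += 1
--         elif allele_list_threshold[i] == 'C':
--             counts[1] += 1
--         elif allele_list_threshold[i] == 'G':
--             counts[2] += 1
--         elif allele_list_threshold[i] == 'T':
--             counts[3] += 1
--     return counts
-- ===== SOURCE B (Python) =====
-- def return_acgtdi_list(ref_idx, allele_list_threshold):
--     # Staged counting: one count() scan per recognized letter builds the whole
--     # 12-slot vector at once; the reference bins (',' and '.') are then added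
--     # in bulk at their dynamic positions.
--     counts = [allele_list_threshold.count(ch) for ch in 'ACGT'] + [0, 0] \
--            + [allele_list_threshold.count(ch) for ch in 'acgt'] + [0, 0]
--     n = allele_list_threshold.count(',')
--     if n:
--         counts[ref_idx] += n
--     n = allele_list_threshold.count('.')
--     if n:
--         counts[ref_idx + 6] += n
--     return counts
-- ===== Notes on version B (the rewrite author's own statement) =====
-- stated objective: alternative
-- what changed: Instead of A's single dispatch loop (ten-branch elif per element incrementing one slot at a time), B builds the 12-slot vector by staged counting: one count() scan per recognized letter placed directly at its fixed position, then the ',' and '.' totals added in bulk at their dynamic ref_idx positions.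
import Mathlib
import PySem

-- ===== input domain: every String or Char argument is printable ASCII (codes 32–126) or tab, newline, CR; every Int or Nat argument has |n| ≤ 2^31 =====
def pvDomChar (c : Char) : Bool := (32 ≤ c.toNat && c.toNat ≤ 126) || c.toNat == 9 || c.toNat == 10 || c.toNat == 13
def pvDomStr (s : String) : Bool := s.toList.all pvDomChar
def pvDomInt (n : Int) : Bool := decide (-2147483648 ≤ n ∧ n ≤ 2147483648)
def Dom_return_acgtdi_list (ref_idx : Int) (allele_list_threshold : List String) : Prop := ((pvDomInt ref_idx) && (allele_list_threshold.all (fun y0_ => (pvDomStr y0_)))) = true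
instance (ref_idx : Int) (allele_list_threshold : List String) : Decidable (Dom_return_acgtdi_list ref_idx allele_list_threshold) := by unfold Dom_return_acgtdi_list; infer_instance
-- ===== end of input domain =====

-- B replaces A's per-element ten-branch dispatch loop by staged counting: one count() scan per
-- recognized letter builds the 12-slot vector directly, then the ','/'.' totals are added in bulk
-- at their dynamic positions ("alternative"); return values agree on all of Pre_.

-- ===== PORT A =====
-- body of one loop iteration of A: the elif chain on allele_list_threshold[i]
def pvStepA (ref_idx : Int) (counts : List Int) (s : String) : List Int :=
  if s == "." then PySem.List.pySetD counts (ref_idx + 6) (PySem.List.pyGetD counts (ref_idx + 6) 0 + 1)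
  else if s == "," then PySem.List.pySetD counts ref_idx (PySem.List.pyGetD counts ref_idx 0 + 1)
  else if s == "a" then PySem.List.pySetD counts 6 (PySem.List.pyGetD counts 6 0 + 1)
  else if s == "c" then PySem.List.pySetD counts 7 (PySem.List.pyGetD counts 7 0 + 1)
  else if s == "g" then PySem.List.pySetD counts 8 (PySem.List.pyGetD counts 8 0 + 1)
  else if s == "t" then PySem.List.pySetD counts 9 (PySem.List.pyGetD counts 9 0 + 1)
  else if s == "A" then PySem.List.pySetD counts 0 (PySem.List.pyGetD counts 0 0 + 1)
  else if s == "C" then PySem.List.pySetD counts 1 (PySem.List.pyGetD counts 1 0 + 1)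
  else if s == "G" then PySem.List.pySetD counts 2 (PySem.List.pyGetD counts 2 0 + 1)
  else if s == "T" then PySem.List.pySetD counts 3 (PySem.List.pyGetD counts 3 0 + 1)
  else counts

def return_acgtdi_list (ref_idx : Int) (allele_list_threshold : List String) : List Int :=
  (PySem.List.pyRange 0 (PySem.List.len allele_list_threshold) 1).foldl
    (fun counts i => pvStepA ref_idx counts (PySem.List.pyGetD allele_list_threshold i ""))
    [0,0,0,0,0,0,0,0,0,0,0,0]

-- ===== PORT B =====
def return_acgtdi_list_alt (ref_idx : Int) (allele_list_threshold : List String) : List Int :=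
  let counts := ("ACGT".toList.map (fun ch => (PySem.List.count allele_list_threshold (String.ofList [ch]) : Int))) ++ [0, 0]
      ++ ("acgt".toList.map (fun ch => (PySem.List.count allele_list_threshold (String.ofList [ch]) : Int))) ++ [0, 0]
  let n1 : Int := (PySem.List.count allele_list_threshold "," : Int)
  let counts1 := if n1 ≠ 0 then PySem.List.pySetD counts ref_idx (PySem.List.pyGetD counts ref_idx 0 + n1) else counts
  let n2 : Int := (PySem.List.count allele_list_threshold "." : Int)
  if n2 ≠ 0 then PySem.List.pySetD counts1 (ref_idx + 6) (PySem.List.pyGetD counts1 (ref_idx + 6) 0 + n2) else counts1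

-- ===== PRECONDITION & SPEC =====
-- Pre_ excludes exactly the inputs on which A raises IndexError: a ',' in the list with
-- ref_idx outside [-12,11], or a '.' in the list with ref_idx+6 outside [-12,11].
def Pre_return_acgtdi_list (ref_idx : Int) (allele_list_threshold : List String) : Prop :=
  ("," ∈ allele_list_threshold → PySem.Raise.InRange 12 ref_idx) ∧
  ("." ∈ allele_list_threshold → PySem.Raise.InRange 12 (ref_idx + 6))
instance (ref_idx : Int) (allele_list_threshold : List String) : Decidable (Pre_return_acgtdi_list ref_idx allele_list_threshold) := by unfold Pre_return_acgtdi_list; infer_instance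

def pvWitness_return_acgtdi_list : Int × List String := (2, ["a", ",", ".", "T", "N"])

def Spec_return_acgtdi_list (ref_idx : Int) (allele_list_threshold : List String) (out : List Int) : Prop := out = return_acgtdi_list_alt ref_idx allele_list_threshold
instance (ref_idx : Int) (allele_list_threshold : List String) (out : List Int) : Decidable (Spec_return_acgtdi_list ref_idx allele_list_threshold out) := by unfold Spec_return_acgtdi_list; infer_instance

-- ===== CLAIM (what is proved, stated in full; the proofs are below) =====
def Claim_equal_return_acgtdi_list : Prop := ∀ (ref_idx : Int) (allele_list_threshold : List String), Dom_return_acgtdi_list ref_idx allele_list_threshold → Pre_return_acgtdi_list ref_idx allele_list_threshold → Spec_return_acgtdi_list ref_idx allele_list_threshold (return_acgtdi_list ref_idx allele_list_threshold)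

-- ===== LEMMAS AND PROOFS =====

-- 'increment slot i (Python indexing) by v'; a no-op for v = 0 and for out-of-range i
-- (pySetD is): every update either program performs is an instance of it.
def pvUpd (c : List Int) (i v : Int) : List Int :=
  PySem.List.pySetD c i (PySem.List.pyGetD c i 0 + v)

theorem pvIdx_lt {n : Nat} {i : Int} {k : Nat} (h : PySem.List.pyIdx? n i = some k) : k < n := by
  simp only [PySem.List.pyIdx?] at h
  split_ifs at h <;> simp_all <;> omega

theorem pvUpd_of_none {c : List Int} {i : Int} (h : PySem.List.pyIdx? c.length i = none) (v : Int) :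
    pvUpd c i v = c := by
  unfold pvUpd PySem.List.pySetD PySem.List.pySet? PySem.List.pyGetD PySem.List.pyGet?
  simp [h]

theorem pvUpd_of_some {c : List Int} {i : Int} {k : Nat} (h : PySem.List.pyIdx? c.length i = some k) (v : Int) :
    pvUpd c i v = c.set k (c.getD k 0 + v) := by
  have hk := pvIdx_lt h
  unfold pvUpd PySem.List.pySetD PySem.List.pySet? PySem.List.pyGetD PySem.List.pyGet?
  simp [h, List.getElem?_eq_getElem hk]

theorem pvGetD_set_self (c : List Int) (k : Nat) (hk : k < c.length) (x : Int) :
    (c.set k x).getD k 0 = x := by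
  rw [List.getD_eq_getElem _ 0 (by simpa using hk)]; exact List.getElem_set_self _

theorem pvGetD_set_ne (c : List Int) (k l : Nat) (hkl : k ≠ l) (hl : l < c.length) (x : Int) :
    (c.set k x).getD l 0 = c.getD l 0 := by
  rw [List.getD_eq_getElem _ 0 (by simpa using hl), List.getD_eq_getElem _ 0 hl]
  exact List.getElem_set_ne hkl _

theorem pvUpd_zero (c : List Int) (i : Int) : pvUpd c i 0 = c := by
  cases h : PySem.List.pyIdx? c.length i with
  | none => exact pvUpd_of_none h 0
  | some k =>
      have hk := pvIdx_lt h
      rw [pvUpd_of_some h 0, add_zero, List.getD_eq_getElem c 0 hk, List.set_getElem_self]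

theorem pvUpd_merge (c : List Int) (i v w : Int) :
    pvUpd (pvUpd c i v) i w = pvUpd c i (v + w) := by
  cases h : PySem.List.pyIdx? c.length i with
  | none => rw [pvUpd_of_none h, pvUpd_of_none h, pvUpd_of_none h]
  | some k =>
      have hk := pvIdx_lt h
      rw [pvUpd_of_some h v, pvUpd_of_some h (v + w)]
      have h2 : PySem.List.pyIdx? (c.set k (c.getD k 0 + v)).length i = some k := by
        rw [List.length_set]; exact h
      rw [pvUpd_of_some h2 w, pvGetD_set_self c k hk, List.set_set, add_assoc]

theorem pvUpd_comm (c : List Int) (i j v w : Int) :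
    pvUpd (pvUpd c i v) j w = pvUpd (pvUpd c j w) i v := by
  cases hi : PySem.List.pyIdx? c.length i with
  | none =>
      rw [pvUpd_of_none hi]
      cases hj : PySem.List.pyIdx? c.length j with
      | none => rw [pvUpd_of_none hj, pvUpd_of_none hi]
      | some l =>
          rw [pvUpd_of_some hj w]
          have hj2 : PySem.List.pyIdx? (c.set l (c.getD l 0 + w)).length i = none := by
            rw [List.length_set]; exact hi
          rw [pvUpd_of_none hj2]
  | some k =>
      have hk := pvIdx_lt hi
      rw [pvUpd_of_some hi v]
      cases hj : PySem.List.pyIdx? c.length j with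
      | none =>
          have hj2 : PySem.List.pyIdx? (c.set k (c.getD k 0 + v)).length j = none := by
            rw [List.length_set]; exact hj
          rw [pvUpd_of_none hj2, pvUpd_of_none hj, pvUpd_of_some hi v]
      | some l =>
          have hl := pvIdx_lt hj
          rw [pvUpd_of_some hj w]
          have hj2 : PySem.List.pyIdx? (c.set k (c.getD k 0 + v)).length j = some l := by
            rw [List.length_set]; exact hj
          have hi2 : PySem.List.pyIdx? (c.set l (c.getD l 0 + w)).length i = some k := by
            rw [List.length_set]; exact hi
          rw [pvUpd_of_some hj2 w, pvUpd_of_some hi2 v]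
          by_cases hkl : k = l
          · subst hkl
            rw [pvGetD_set_self c k hk, pvGetD_set_self c k hk, List.set_set, List.set_set]
            ring_nf
          · rw [pvGetD_set_ne c k l hkl hl, pvGetD_set_ne c l k (Ne.symm hkl) hk,
                List.set_comm _ _ hkl]

-- the guarded bulk-add of Source B ('if n: counts[i] += n') is pvUpd unconditionally
theorem pvIf_upd (c : List Int) (i n : Int) :
    (if n ≠ 0 then PySem.List.pySetD c i (PySem.List.pyGetD c i 0 + n) else c) = pvUpd c i n := by
  by_cases h : n = 0
  · simp [h, pvUpd_zero]
  · simp [h, pvUpd]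

-- the letter-count vector B starts from
def pvBase (xs : List String) : List Int :=
  [(PySem.List.count xs "A" : Int), (PySem.List.count xs "C" : Int),
   (PySem.List.count xs "G" : Int), (PySem.List.count xs "T" : Int), 0, 0,
   (PySem.List.count xs "a" : Int), (PySem.List.count xs "c" : Int),
   (PySem.List.count xs "g" : Int), (PySem.List.count xs "t" : Int), 0, 0]

-- B in closed form: base vector, then the two bulk additions (the 'if n:' guards drop by pvUpd_zero)
theorem alt_eq (ref_idx : Int) (xs : List String) :
    return_acgtdi_list_alt ref_idx xs =
      pvUpd (pvUpd (pvBase xs) ref_idx (PySem.List.count xs "," : Int))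
        (ref_idx + 6) (PySem.List.count xs "." : Int) := by
  show (let counts := pvBase xs;
        let n1 : Int := (PySem.List.count xs "," : Int);
        let counts1 := if n1 ≠ 0 then PySem.List.pySetD counts ref_idx (PySem.List.pyGetD counts ref_idx 0 + n1) else counts;
        let n2 : Int := (PySem.List.count xs "." : Int);
        if n2 ≠ 0 then PySem.List.pySetD counts1 (ref_idx + 6) (PySem.List.pyGetD counts1 (ref_idx + 6) 0 + n2) else counts1) = _
  simp only [pvIf_upd]

-- effect of one more element on the letter-count vector
theorem pvBase_append (xs : List String) (x : String) :
    pvBase (xs ++ [x]) =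
      if x = "a" then pvUpd (pvBase xs) 6 1
      else if x = "c" then pvUpd (pvBase xs) 7 1
      else if x = "g" then pvUpd (pvBase xs) 8 1
      else if x = "t" then pvUpd (pvBase xs) 9 1
      else if x = "A" then pvUpd (pvBase xs) 0 1
      else if x = "C" then pvUpd (pvBase xs) 1 1
      else if x = "G" then pvUpd (pvBase xs) 2 1
      else if x = "T" then pvUpd (pvBase xs) 3 1
      else pvBase xs := by
  by_cases h1 : x = "a" <;> by_cases h2 : x = "c" <;> by_cases h3 : x = "g" <;>
    by_cases h4 : x = "t" <;> by_cases h5 : x = "A" <;> by_cases h6 : x = "C" <;>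
    by_cases h7 : x = "G" <;> by_cases h8 : x = "T" <;>
    simp_all [pvBase, PySem.List.count, List.count_append, pvUpd,
      PySem.List.pySetD, PySem.List.pySet?, PySem.List.pyGetD, PySem.List.pyGet?,
      PySem.List.pyIdx?]

-- folding the primitive write-back into pvUpd (definitional)
theorem pvUpd_fold (c : List Int) (i : Int) :
    PySem.List.pySetD c i (PySem.List.pyGetD c i 0 + 1) = pvUpd c i 1 := rfl

-- one loop step of A, acting on B's closed form (unconditionally: pvUpd is a no-op out of range)
theorem foldA_step (ref_idx : Int) (xs : List String) (x : String) :
    pvStepA ref_idx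
      (pvUpd (pvUpd (pvBase xs) ref_idx (PySem.List.count xs "," : Int)) (ref_idx + 6) (PySem.List.count xs "." : Int)) x =
    pvUpd (pvUpd (pvBase (xs ++ [x])) ref_idx (PySem.List.count (xs ++ [x]) "," : Int)) (ref_idx + 6) (PySem.List.count (xs ++ [x]) "." : Int) := by
  by_cases h1 : x = "."
  · subst h1
    simp [pvStepA, pvBase_append, pvUpd_fold, pvUpd_merge]
  by_cases h2 : x = ","
  · subst h2
    simp [pvStepA, pvBase_append, pvUpd_fold]
    rw [pvUpd_comm (pvUpd (pvBase xs) ref_idx _) (ref_idx + 6) ref_idx, pvUpd_merge]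
  by_cases h3 : x = "a"
  · subst h3
    simp [pvStepA, pvBase_append, pvUpd_fold]
    rw [pvUpd_comm (pvUpd (pvBase xs) ref_idx _) (ref_idx + 6) 6, pvUpd_comm (pvBase xs) ref_idx 6]
  by_cases h4 : x = "c"
  · subst h4
    simp [pvStepA, pvBase_append, pvUpd_fold]
    rw [pvUpd_comm (pvUpd (pvBase xs) ref_idx _) (ref_idx + 6) 7, pvUpd_comm (pvBase xs) ref_idx 7]
  by_cases h5 : x = "g"
  · subst h5
    simp [pvStepA, pvBase_append, pvUpd_fold]
    rw [pvUpd_comm (pvUpd (pvBase xs) ref_idx _) (ref_idx + 6) 8, pvUpd_comm (pvBase xs) ref_idx 8]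
  by_cases h6 : x = "t"
  · subst h6
    simp [pvStepA, pvBase_append, pvUpd_fold]
    rw [pvUpd_comm (pvUpd (pvBase xs) ref_idx _) (ref_idx + 6) 9, pvUpd_comm (pvBase xs) ref_idx 9]
  by_cases h7 : x = "A"
  · subst h7
    simp [pvStepA, pvBase_append, pvUpd_fold]
    rw [pvUpd_comm (pvUpd (pvBase xs) ref_idx _) (ref_idx + 6) 0, pvUpd_comm (pvBase xs) ref_idx 0]
  by_cases h8 : x = "C"
  · subst h8
    simp [pvStepA, pvBase_append, pvUpd_fold]
    rw [pvUpd_comm (pvUpd (pvBase xs) ref_idx _) (ref_idx + 6) 1, pvUpd_comm (pvBase xs) ref_idx 1]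
  by_cases h9 : x = "G"
  · subst h9
    simp [pvStepA, pvBase_append, pvUpd_fold]
    rw [pvUpd_comm (pvUpd (pvBase xs) ref_idx _) (ref_idx + 6) 2, pvUpd_comm (pvBase xs) ref_idx 2]
  by_cases h10 : x = "T"
  · subst h10
    simp [pvStepA, pvBase_append, pvUpd_fold]
    rw [pvUpd_comm (pvUpd (pvBase xs) ref_idx _) (ref_idx + 6) 3, pvUpd_comm (pvBase xs) ref_idx 3]
  simp [pvStepA, pvBase_append, h1, h2, h3, h4, h5, h6, h7, h8, h9, h10, beq_iff_eq]

-- the fold A performs, in B's closed form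
theorem foldA_eq (ref_idx : Int) (xs : List String) :
    xs.foldl (pvStepA ref_idx) [0,0,0,0,0,0,0,0,0,0,0,0] =
      pvUpd (pvUpd (pvBase xs) ref_idx (PySem.List.count xs "," : Int))
        (ref_idx + 6) (PySem.List.count xs "." : Int) := by
  induction xs using List.reverseRecOn with
  | nil => simp [pvBase, PySem.List.count, pvUpd_zero]
  | append_singleton xs x ih =>
      rw [List.foldl_append, List.foldl_cons, List.foldl_nil, ih]
      exact foldA_step ref_idx xs x

-- ===== VERDICT (by name: the statement is the Claim_ definition above) =====
theorem return_acgtdi_list_spec : Claim_equal_return_acgtdi_list := by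
  intro ref_idx xs _ _
  unfold Spec_return_acgtdi_list return_acgtdi_list
  rw [PySem.List.foldl_pyRange_zero_pyGetD, alt_eq]
  exact foldA_eq ref_idx xs
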